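-- pv_equiv track=rewrite | github.com/arkutils/Purlovia | processing/spawn_maps/swaps.py | make_random_class_weights_dict
-- ===== SOURCE A (Python) =====
-- def make_random_class_weights_dict(random_class_weights):
--     '''
--     Generates a look-up dict for random class weights.
--     '''
--     lookup = dict()
--     for remap_entry in random_class_weights:
--         if not remap_entry['to']:
--             continue
--
--         from_classes = remap_entry['from']
--
--         for from_class in from_classes:
--             if from_class and from_class not in lookup:
--                 lookup[from_class] = remap_entry
--     return lookup
-- ===== SOURCE B (Python) =====
-- def make_random_class_weights_dict(random_class_weights):
--     '''
--     Generates a look-up dict for random class weights.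
--     '''
--     entries = [e for e in random_class_weights if e['to']]
--     keys = dict.fromkeys(fc for e in entries for fc in e['from'] if fc)
--     return {k: next(e for e in entries if k in e['from']) for k in keys}
-- ===== Notes on version B (the rewrite author's own statement) =====
-- stated objective: alternative
-- what changed: Replaces A's single-pass incremental dict build (insert each from_class only if not yet present) by two staged passes: first collect the ordered distinct keys with dict.fromkeys, then look each key's value up with next() scanning the filtered entries for the first one whose 'from' list contains it.
-- outside the precondition, e.g. on make_random_class_weights_dict([{'from': ['a']}]): A raises KeyError, B raises KeyError; on make_random_class_weights_dict([{'to': ['X']}]): A raises KeyError, B raises KeyError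
import Mathlib
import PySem

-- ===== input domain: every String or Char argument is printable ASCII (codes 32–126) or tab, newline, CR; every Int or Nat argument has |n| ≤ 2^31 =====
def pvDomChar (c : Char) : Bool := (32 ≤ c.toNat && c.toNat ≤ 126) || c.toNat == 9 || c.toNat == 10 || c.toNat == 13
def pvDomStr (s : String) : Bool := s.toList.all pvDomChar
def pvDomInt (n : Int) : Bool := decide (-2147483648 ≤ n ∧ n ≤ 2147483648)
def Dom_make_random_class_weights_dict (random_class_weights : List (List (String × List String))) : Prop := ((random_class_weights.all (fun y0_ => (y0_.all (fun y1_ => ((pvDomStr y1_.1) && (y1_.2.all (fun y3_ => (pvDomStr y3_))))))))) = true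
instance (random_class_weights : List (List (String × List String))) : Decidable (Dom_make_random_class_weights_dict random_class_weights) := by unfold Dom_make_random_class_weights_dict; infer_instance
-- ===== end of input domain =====

-- B replaces A's incremental first-wins dict build by two staged passes: collect the
-- ordered distinct keys first, then look each key's value up by scanning the filtered
-- entries for the first one containing it (alternative decomposition, same return value).

-- ===== PORT A =====
-- A: one pass building the dict; skip entries with falsy 'to'; insert each non-empty,
-- not-yet-present from_class. e['to'] / e['from'] raise KeyError when absent: those
-- inputs are outside Pre_ (getD's default is only reached there).
def make_random_class_weights_dict (random_class_weights : List (List (String × List String))) : List (String × List (String × List String)) :=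
  (random_class_weights.foldl
    (fun lookup remap_entry =>
      if (PySem.Dict.mk remap_entry).getD "to" [] = [] then lookup
      else
        let from_classes := (PySem.Dict.mk remap_entry).getD "from" []
        from_classes.foldl
          (fun lk from_class =>
            if from_class ≠ "" ∧ lk.contains from_class = false then lk.insert from_class remap_entry
            else lk)
          lookup)
    PySem.Dict.empty).items

-- ===== PORT B =====
-- B: filter entries with truthy 'to'; dict.fromkeys over all truthy from_classes gives
-- the ordered distinct keys (PySem.List.dedup); then a dict comprehension pairing each
-- key with next(e for e in entries if k in e['from']). The 'next' cannot exhaust for a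
-- key produced by the key pass, so the none arm ([] here; StopIteration in Python) is unreachable.
def make_random_class_weights_dict_alt (random_class_weights : List (List (String × List String))) : List (String × List (String × List String)) :=
  let entries := random_class_weights.filter (fun e => (PySem.Dict.mk e).getD "to" [] ≠ [])
  let keys := PySem.List.dedup (entries.flatMap (fun e => ((PySem.Dict.mk e).getD "from" []).filter (fun fc => fc ≠ "")))
  keys.map (fun k =>
    (k, match entries.find? (fun e => ((PySem.Dict.mk e).getD "from" []).contains k) with
        | some e => e
        | none => []))

-- ===== PRECONDITION & SPEC =====
-- Pre_ excludes exactly the inputs where A raises KeyError: an entry without key "to",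
-- or an entry with truthy "to" but without key "from" (B raises KeyError there too).
def Pre_make_random_class_weights_dict (random_class_weights : List (List (String × List String))) : Prop :=
  ∀ e ∈ random_class_weights,
    (PySem.Dict.mk e).contains "to" = true ∧
    ((PySem.Dict.mk e).getD "to" [] ≠ [] → (PySem.Dict.mk e).contains "from" = true)
instance (random_class_weights : List (List (String × List String))) : Decidable (Pre_make_random_class_weights_dict random_class_weights) := by unfold Pre_make_random_class_weights_dict; infer_instance

def pvWitness_make_random_class_weights_dict : (List (List (String × List String))) :=
  [[("to", ["X"]), ("from", ["a", ""])], [("to", []), ("x", [])]]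

def Spec_make_random_class_weights_dict (random_class_weights : List (List (String × List String))) (out : List (String × List (String × List String))) : Prop := out = make_random_class_weights_dict_alt random_class_weights
instance (random_class_weights : List (List (String × List String))) (out : List (String × List (String × List String))) : Decidable (Spec_make_random_class_weights_dict random_class_weights out) := by unfold Spec_make_random_class_weights_dict; infer_instance

-- ===== CLAIM (what is proved, stated in full; the proofs are below) =====
def Claim_equal_make_random_class_weights_dict : Prop := ∀ (random_class_weights : List (List (String × List String))), Dom_make_random_class_weights_dict random_class_weights → Pre_make_random_class_weights_dict random_class_weights → Spec_make_random_class_weights_dict random_class_weights (make_random_class_weights_dict random_class_weights)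

-- ===== LEMMAS AND PROOFS =====

-- proof-only abbreviations: an entry's truthy from-classes, A's inner loop, A's outer loop
def pvFroms (e : List (String × List String)) : List String :=
  ((PySem.Dict.mk e).getD "from" []).filter (fun fc => fc ≠ "")

def pvInner (e : List (String × List String)) (d : PySem.Dict String (List (String × List String)))
    (l : List String) : PySem.Dict String (List (String × List String)) :=
  l.foldl (fun lk fc => if fc ≠ "" ∧ lk.contains fc = false then lk.insert fc e else lk) d

def pvOuter (es : List (List (String × List String)))
    (d : PySem.Dict String (List (String × List String))) : PySem.Dict String (List (String × List String)) :=
  es.foldl (fun lookup e => pvInner e lookup ((PySem.Dict.mk e).getD "from" [])) d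

theorem inner_contains (e : List (String × List String)) (l : List String)
    (d : PySem.Dict String (List (String × List String))) (k : String) :
    (pvInner e d l).contains k = (d.contains k || (l.filter (fun fc => fc ≠ "")).contains k) := by
  induction l generalizing d with
  | nil => simp [pvInner]
  | cons fc rest ih =>
    simp only [pvInner, List.foldl_cons] at *
    by_cases hfc : fc = ""
    · rw [List.filter_cons_of_neg (by simp [hfc]), if_neg (by simp [hfc]), ih]
    · rw [List.filter_cons_of_pos (by simp [hfc])]
      by_cases hc : d.contains fc
      · rw [if_neg (by simp [hc]), ih]
        by_cases hk : k = fc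
        · simp [hk, hc]
        · simp [hk]
      · rw [if_pos ⟨hfc, by simp [hc]⟩, ih]
        by_cases hk : k = fc
        · simp [hk, PySem.Dict.contains_insert_self]
        · have hb : (k == fc) = false := by simp [hk]
          simp [PySem.Dict.contains_insert, hb, hk]

theorem inner_getD (e : List (String × List String)) (l : List String)
    (d : PySem.Dict String (List (String × List String))) (k : String) :
    (pvInner e d l).getD k []
      = if ((l.filter (fun fc => fc ≠ "")).contains k && !d.contains k) then e else d.getD k [] := by
  induction l generalizing d with
  | nil => simp [pvInner]
  | cons fc rest ih =>
    simp only [pvInner, List.foldl_cons] at *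
    by_cases hfc : fc = ""
    · rw [List.filter_cons_of_neg (by simp [hfc]), if_neg (by simp [hfc]), ih]
    · rw [List.filter_cons_of_pos (by simp [hfc])]
      by_cases hc : d.contains fc
      · rw [if_neg (by simp [hc]), ih]
        by_cases hk : k = fc
        · simp [hk, hc]
        · simp [hk]
      · rw [if_pos ⟨hfc, by simp [hc]⟩, ih]
        by_cases hk : k = fc
        · simp [hk, hc, PySem.Dict.contains_insert_self, PySem.Dict.getD_insert_self]
        · have hb : (k == fc) = false := by simp [hk]
          simp [PySem.Dict.contains_insert, hb, hk, PySem.Dict.getD_insert]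

theorem inner_keys (e : List (String × List String)) (l : List String)
    (d : PySem.Dict String (List (String × List String))) :
    (pvInner e d l).keys = PySem.Set.update d.keys (l.filter (fun fc => fc ≠ "")) := by
  induction l generalizing d with
  | nil => simp [pvInner]
  | cons fc rest ih =>
    simp only [pvInner, List.foldl_cons] at *
    by_cases hfc : fc = ""
    · rw [List.filter_cons_of_neg (by simp [hfc]), if_neg (by simp [hfc]), ih]
    · rw [List.filter_cons_of_pos (by simp [hfc]), PySem.Set.update_cons]
      by_cases hc : d.contains fc
      · rw [if_neg (by simp [hc]), ih]
        have hadd : PySem.Set.add d.keys fc = d.keys := by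
          have hmem : fc ∈ d.keys := by
            rw [PySem.Dict.contains_eq_decide_mem_keys] at hc
            simpa using hc
          simp [PySem.Set.add, PySem.Set.contains, List.contains_eq_mem, hmem]
        rw [hadd]
      · rw [if_pos ⟨hfc, by simp [hc]⟩, ih,
            PySem.Dict.keys_insert_of_not_contains _ _ (by simpa using hc)]
        have hadd : PySem.Set.add d.keys fc = d.keys ++ [fc] := by
          have h2 : ¬ fc ∈ d.keys := by
            rw [PySem.Dict.contains_eq_decide_mem_keys] at hc
            simpa using hc
          simp [PySem.Set.add, PySem.Set.contains, List.contains_eq_mem, h2]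
        rw [hadd]

theorem outer_keys (es : List (List (String × List String)))
    (d : PySem.Dict String (List (String × List String))) :
    (pvOuter es d).keys = PySem.Set.update d.keys (es.flatMap pvFroms) := by
  induction es generalizing d with
  | nil => simp [pvOuter]
  | cons e rest ih =>
    simp only [pvOuter, List.foldl_cons, List.flatMap_cons] at *
    rw [ih, inner_keys, PySem.Set.update_append, pvFroms]

theorem outer_getD (es : List (List (String × List String)))
    (d : PySem.Dict String (List (String × List String))) (k : String) :
    (pvOuter es d).getD k []
      = if d.contains k then d.getD k []
        else match es.find? (fun e => (pvFroms e).contains k) with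
             | some e => e
             | none => [] := by
  induction es generalizing d with
  | nil =>
    simp only [pvOuter, List.foldl_nil, List.find?_nil]
    by_cases hc : d.contains k
    · simp [hc]
    · simp [hc, PySem.Dict.getD_of_not_contains _ _ (by simpa using hc)]
  | cons e rest ih =>
    simp only [pvOuter, List.foldl_cons] at *
    rw [ih]
    by_cases hc : d.contains k = true
    · have h1 : (pvInner e d ((PySem.Dict.mk e).getD "from" [])).contains k = true := by
        rw [inner_contains, hc]; rfl
      have h2 : (pvInner e d ((PySem.Dict.mk e).getD "from" [])).getD k [] = d.getD k [] := by
        rw [inner_getD, hc]; simp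
      rw [if_pos h1, if_pos hc, h2]
    · have hcf : d.contains k = false := by simpa using hc
      by_cases hm : (pvFroms e).contains k = true
      · have hm' : ((((PySem.Dict.mk e).getD "from" []).filter (fun fc => fc ≠ "")).contains k) = true := by
          simpa [pvFroms] using hm
        have h1 : (pvInner e d ((PySem.Dict.mk e).getD "from" [])).contains k = true := by
          rw [inner_contains, hcf, hm']; rfl
        have h2 : (pvInner e d ((PySem.Dict.mk e).getD "from" [])).getD k [] = e := by
          rw [inner_getD, hm', hcf]; simp
        rw [if_pos h1, if_neg hc, h2,
            List.find?_cons_of_pos (p := fun e => (pvFroms e).contains k) hm]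
      · have hmf : ((((PySem.Dict.mk e).getD "from" []).filter (fun fc => fc ≠ "")).contains k) = false := by
          have : (pvFroms e).contains k = false := by simpa using hm
          simpa [pvFroms] using this
        have h1 : (pvInner e d ((PySem.Dict.mk e).getD "from" [])).contains k = false := by
          rw [inner_contains, hcf, hmf]; rfl
        rw [if_neg (by simp [h1]), if_neg hc,
            List.find?_cons_of_neg (p := fun e => (pvFroms e).contains k) hm]

-- ===== VERDICT (by name: the statement is the Claim_ definition above) =====
theorem make_random_class_weights_dict_spec : Claim_equal_make_random_class_weights_dict := by
  intro rcw _ _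
  unfold Spec_make_random_class_weights_dict make_random_class_weights_dict make_random_class_weights_dict_alt
  have hbody : (fun (lookup : PySem.Dict String (List (String × List String))) remap_entry =>
      if (PySem.Dict.mk remap_entry).getD "to" [] = [] then lookup
      else
        let from_classes := (PySem.Dict.mk remap_entry).getD "from" []
        from_classes.foldl
          (fun lk from_class =>
            if from_class ≠ "" ∧ lk.contains from_class = false then lk.insert from_class remap_entry
            else lk)
          lookup)
    = (fun lookup e =>
        if (decide (¬ (PySem.Dict.mk e).getD "to" [] = [])) = true
        then pvInner e lookup ((PySem.Dict.mk e).getD "from" []) else lookup) := by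
    funext d e
    by_cases h : (PySem.Dict.mk e).getD "to" [] = [] <;> simp [h, pvInner]
  rw [hbody, ← List.foldl_filter]
  set es := rcw.filter (fun e => decide ¬(PySem.Dict.mk e).getD "to" [] = []) with hes
  have hout : es.foldl (fun lookup e => pvInner e lookup ((PySem.Dict.mk e).getD "from" []))
      PySem.Dict.empty = pvOuter es PySem.Dict.empty := rfl
  rw [hout]
  have hnd : (pvOuter es PySem.Dict.empty).keys.Nodup := by
    rw [outer_keys]
    exact PySem.Set.nodup_update _ _ (by simp [PySem.Dict.keys_empty])
  rw [PySem.Dict.items_eq_map_keys _ hnd [], outer_keys, PySem.Dict.keys_empty,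
      PySem.Set.update_nil_left, ← PySem.List.dedup_eq_ofList]
  have hflat : es.flatMap pvFroms
      = es.flatMap (fun e => ((PySem.Dict.mk e).getD "from" []).filter (fun fc => fc ≠ "")) := rfl
  rw [hflat]
  apply List.map_congr_left
  intro k hk
  have hkne : k ≠ "" := by
    rw [PySem.List.dedup_eq_ofList, PySem.Set.mem_ofList] at hk
    simp only [List.mem_flatMap, List.mem_filter] at hk
    obtain ⟨e, -, -, h⟩ := hk
    simpa using h
  have hg := outer_getD es PySem.Dict.empty k
  rw [PySem.Dict.contains_empty] at hg
  simp only [Bool.false_eq_true, if_false] at hg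
  rw [hg]
  have hpred : (fun e => (pvFroms e).contains k)
      = (fun e => ((PySem.Dict.mk e).getD "from" []).contains k) := by
    funext e
    simp [pvFroms, List.contains_eq_mem, hkne]
  rw [hpred]
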